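-- pv_equiv track=rewrite | github.com/algorithmmmm/algorithm | 230725/김승희/PRG_자물쇠와열쇠_김승희.py | check
-- ===== SOURCE A (Python) =====
-- def check(lock, key, M):
--     I = len(lock)
--     J = len(lock[0])
--     for i in range(M):
--         if i + I  > M: continue
--         for j in range(M):
--             if j + J > M: continue
--             if isSame(lock, key, i, j):
--                 return True
--     return False
--
-- def isSame(lock, key, I, J):
--     for i in range(len(lock)):
--         for j in range(len(lock[0])):
--             if lock[i][j] != key[I+i][J+j]:
--                 return False
--     return True
-- ===== SOURCE B (Python) =====
-- def check(lock, key, M):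
--     # Rabin-Karp style 2D matching: per-row prefix polynomial hashes of key,
--     # O(I) hash comparisons per window, full verification only on a hash hit.
--     I = len(lock)
--     J = len(lock[0])
--     if I > M or J > M:
--         return False
--     B = 1 << 33
--     powB = [B ** t for t in range(M + 1)]
--     pref = []
--     for r in range(M):
--         row = key[r]
--         p = [0]
--         acc = 0
--         for t in range(M):
--             acc += row[t] * powB[t]
--             p.append(acc)
--         pref.append(p)
--     pat = [sum(lock[r][t] * powB[t] for t in range(J)) for r in range(I)]
--     for i in range(M - I + 1):
--         for j in range(M - J + 1):
--             if all(pref[i + r][j + J] - pref[i + r][j] == pat[r] * powB[j] for r in range(I)):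
--                 if all(lock[r][t] == key[i + r][j + t] for r in range(I) for t in range(J)):
--                     return True
--     return False
-- ===== Notes on version B (the rewrite author's own statement) =====
-- stated objective: alternative
-- what changed: B replaces the offset-by-offset elementwise comparison with Rabin-Karp style matching: it precomputes per-row prefix polynomial hashes of the key once, tests each candidate window with I hash comparisons instead of I*J cell comparisons, and runs the full elementwise verification only on a hash hit.
-- outside the precondition, e.g. on check([[1]], [[1]], 2): A returns True, B raises IndexError; on check([[0, 0], [1]], [[0, 0], [0, 0]], 2): A returns False, B raises IndexError
import Mathlib
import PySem

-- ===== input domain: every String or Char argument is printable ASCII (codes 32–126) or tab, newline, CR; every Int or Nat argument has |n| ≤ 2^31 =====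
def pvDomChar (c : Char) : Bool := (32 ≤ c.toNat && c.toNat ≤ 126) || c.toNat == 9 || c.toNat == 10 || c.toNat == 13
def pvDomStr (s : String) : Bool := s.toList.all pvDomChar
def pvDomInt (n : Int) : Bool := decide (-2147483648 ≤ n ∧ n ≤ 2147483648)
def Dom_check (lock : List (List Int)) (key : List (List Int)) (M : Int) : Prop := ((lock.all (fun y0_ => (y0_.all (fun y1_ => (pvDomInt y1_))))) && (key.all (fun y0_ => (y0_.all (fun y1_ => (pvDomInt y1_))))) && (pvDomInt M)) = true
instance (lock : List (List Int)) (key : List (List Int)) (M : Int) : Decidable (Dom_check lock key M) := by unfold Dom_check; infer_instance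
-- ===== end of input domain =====

-- B replaces the offset-by-offset elementwise scan by Rabin-Karp style matching: per-row
-- prefix polynomial hashes of the key are precomputed once, each window is tested with I
-- hash comparisons, and the elementwise verification runs only on a hash hit (objective: alternative).

-- ===== PORT A =====
def isSame (lock : List (List Int)) (key : List (List Int)) (I : Int) (J : Int) : Bool :=
  (PySem.List.pyRange 0 (lock.length : Int)).all fun i =>
    (PySem.List.pyRange 0 ((PySem.List.pyGetD lock 0 []).length : Int)).all fun j =>
      PySem.List.pyGetD (PySem.List.pyGetD lock i []) j 0 ==
        PySem.List.pyGetD (PySem.List.pyGetD key (I + i) []) (J + j) 0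

def check (lock : List (List Int)) (key : List (List Int)) (M : Int) : Bool :=
  let I : Int := lock.length
  let J : Int := (PySem.List.pyGetD lock 0 []).length
  (PySem.List.pyRange 0 M).any fun i =>
    if i + I > M then false
    else
      (PySem.List.pyRange 0 M).any fun j =>
        if j + J > M then false
        else isSame lock key i j

-- ===== PORT B =====
-- prefix polynomial hashes of one key row: p = [0]; for t in range(M): acc += row[t]*powB[t]; p.append(acc)
def bRowPref (pw : List Int) (row : List Int) (M : Int) : List Int :=
  ((PySem.List.pyRange 0 M).foldl (fun (s : List Int × Int) t =>
    let acc := s.2 + PySem.List.pyGetD row t 0 * PySem.List.pyGetD pw t 0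
    (s.1 ++ [acc], acc)) ([0], 0)).1

-- pref = []; for r in range(M): pref.append(row prefix hashes of key[r])
def bPref (key : List (List Int)) (pw : List Int) (M : Int) : List (List Int) :=
  (PySem.List.pyRange 0 M).foldl
    (fun prefAcc r => prefAcc ++ [bRowPref pw (PySem.List.pyGetD key r []) M]) []

-- pat = [sum(lock[r][t]*powB[t] for t in range(J)) for r in range(I)]
def bPat (lock : List (List Int)) (pw : List Int) (J : Int) : List Int :=
  (PySem.List.pyRange 0 (lock.length : Int)).map fun r =>
    (PySem.List.pyRange 0 J).foldl
      (fun acc t => acc + PySem.List.pyGetD (PySem.List.pyGetD lock r []) t 0 * PySem.List.pyGetD pw t 0) 0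

def check_alt (lock : List (List Int)) (key : List (List Int)) (M : Int) : Bool :=
  let I : Int := lock.length
  let J : Int := (PySem.List.pyGetD lock 0 []).length
  if I > M || J > M then false
  else
    let Bc : Int := 1 <<< 33
    let pw : List Int := (PySem.List.pyRange 0 (M + 1)).map fun t => Bc ^ t.toNat
    let pref := bPref key pw M
    let pat := bPat lock pw J
    (PySem.List.pyRange 0 (M - I + 1)).any fun i =>
      (PySem.List.pyRange 0 (M - J + 1)).any fun j =>
        ((PySem.List.pyRange 0 I).all fun r =>
          PySem.List.pyGetD (PySem.List.pyGetD pref (i + r) []) (j + J) 0 -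
              PySem.List.pyGetD (PySem.List.pyGetD pref (i + r) []) j 0 ==
            PySem.List.pyGetD pat r 0 * PySem.List.pyGetD pw j 0)
        && ((PySem.List.pyRange 0 I).all fun r =>
              (PySem.List.pyRange 0 J).all fun t =>
                PySem.List.pyGetD (PySem.List.pyGetD lock r []) t 0 ==
                  PySem.List.pyGetD (PySem.List.pyGetD key (i + r) []) (j + t) 0)

-- ===== PRECONDITION & SPEC =====
-- Pre_ excludes inputs on which A raises IndexError (empty lock; and, once a window fits,
-- a lock row shorter than lock[0] or a key smaller than M×M); it also excludes the inputs
-- with such a too-small lock/key on which A happens to return early before touching the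
-- missing entry.
def Pre_check (lock : List (List Int)) (key : List (List Int)) (M : Int) : Prop :=
  lock ≠ [] ∧
  ((lock.length : Int) ≤ M ∧ ((lock.headD []).length : Int) ≤ M →
    (∀ row ∈ lock, (lock.headD []).length ≤ row.length) ∧
    M ≤ (key.length : Int) ∧ ∀ row ∈ key, M ≤ (row.length : Int))
instance (lock : List (List Int)) (key : List (List Int)) (M : Int) : Decidable (Pre_check lock key M) := by unfold Pre_check; infer_instance

def pvWitness_check : List (List Int) × List (List Int) × Int := ([[1]], [[1]], 1)

def Spec_check (lock : List (List Int)) (key : List (List Int)) (M : Int) (out : Bool) : Prop := out = check_alt lock key M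
instance (lock : List (List Int)) (key : List (List Int)) (M : Int) (out : Bool) : Decidable (Spec_check lock key M out) := by unfold Spec_check; infer_instance

-- ===== CLAIM (what is proved, stated in full; the proofs are below) =====
def Claim_equal_check : Prop := ∀ (lock : List (List Int)) (key : List (List Int)) (M : Int), Dom_check lock key M → Pre_check lock key M → Spec_check lock key M (check lock key M)

-- ===== LEMMAS AND PROOFS =====

-- prefix-sum value: pS row pw k = sum_{t<k} row[t]*pw[t]
def pS (row pw : List Int) (k : Nat) : Int :=
  ((List.range k).map (fun (t : Nat) => PySem.List.pyGetD row ((t : Nat) : Int) 0 * PySem.List.pyGetD pw ((t : Nat) : Int) 0)).sum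

theorem pv_rowPref_fold (row pw : List Int) (m : Nat) :
    (PySem.List.pyRange 0 (m : Int)).foldl (fun (s : List Int × Int) t =>
        let acc := s.2 + PySem.List.pyGetD row t 0 * PySem.List.pyGetD pw t 0
        (s.1 ++ [acc], acc)) ([0], 0)
      = ((List.range (m + 1)).map (fun k => pS row pw k), pS row pw m) := by
  induction m with
  | zero =>
    rw [PySem.List.pyRange_one_eq_nil (by omega)]
    simp [pS]
  | succ m ih =>
    have hc : ((m + 1 : Nat) : Int) = (m : Int) + 1 := by push_cast; ring
    rw [hc, PySem.List.pyRange_one_succ_right (by omega), List.foldl_append, ih]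
    have hS : pS row pw (m + 1)
        = pS row pw m + PySem.List.pyGetD row (m : Int) 0 * PySem.List.pyGetD pw (m : Int) 0 := by
      simp [pS, List.range_succ]
    simp [hS, List.range_succ (n := m + 1)]

theorem pv_rowPref_eq (row pw : List Int) (M : Int) (hM : 0 ≤ M) :
    bRowPref pw row M = (List.range (M.toNat + 1)).map (fun k => pS row pw k) := by
  unfold bRowPref
  have h : M = (M.toNat : Int) := by omega
  conv_lhs => rw [h, pv_rowPref_fold]

theorem pv_pref_get (key : List (List Int)) (pw : List Int) (M r : Int)
    (h0 : 0 ≤ r) (h1 : r < M) :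
    PySem.List.pyGetD (bPref key pw M) r [] = bRowPref pw (PySem.List.pyGetD key r []) M := by
  unfold bPref
  rw [PySem.List.foldl_append_singleton_eq_map
    (f := fun r => bRowPref pw (PySem.List.pyGetD key r []) M), List.nil_append]
  have hM : M = (M.toNat : Int) := by omega
  have hr : r = ((r.toNat : Nat) : Int) := by omega
  rw [hM, hr, PySem.List.pyGetD_map_pyRange _ _ _ _ (by omega)]

theorem pv_pS_get (row pw : List Int) (n : Nat) (k : Int) (h0 : 0 ≤ k) (h1 : k.toNat < n) :
    PySem.List.pyGetD ((List.range n).map (fun k => pS row pw k)) k 0 = pS row pw k.toNat := by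
  rw [PySem.List.pyGetD_eq_getElem _ 0 h0 (by simpa using (by omega : k < (n : Int)))]
  simp

theorem pv_pw_get (Bc M t : Int) (h0 : 0 ≤ t) (h1 : t ≤ M) :
    PySem.List.pyGetD ((PySem.List.pyRange 0 (M + 1)).map fun t => Bc ^ t.toNat) t 0
      = Bc ^ t.toNat := by
  have hM : M + 1 = ((M.toNat + 1 : Nat) : Int) := by omega
  have ht : t = ((t.toNat : Nat) : Int) := by omega
  rw [hM, ht, PySem.List.pyGetD_map_pyRange _ _ _ _ (by omega)]

-- the window hash equation follows from elementwise equality of the window and the pattern row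
theorem pv_verify_imp_hash (lock key : List (List Int)) (M i j r : Int)
    (hi : 0 ≤ i) (hiM : i + (lock.length : Int) ≤ M)
    (hj : 0 ≤ j) (hjM : j + ((PySem.List.pyGetD lock 0 []).length : Int) ≤ M)
    (hr0 : 0 ≤ r) (hr1 : r < (lock.length : Int))
    (hv : ∀ t : Int, 0 ≤ t → t < ((PySem.List.pyGetD lock 0 []).length : Int) →
      PySem.List.pyGetD (PySem.List.pyGetD lock r []) t 0 =
        PySem.List.pyGetD (PySem.List.pyGetD key (i + r) []) (j + t) 0) :
    PySem.List.pyGetD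
        (PySem.List.pyGetD (bPref key ((PySem.List.pyRange 0 (M + 1)).map fun t => (1 <<< 33 : Int) ^ t.toNat) M) (i + r) [])
        (j + ((PySem.List.pyGetD lock 0 []).length : Int)) 0 -
      PySem.List.pyGetD
        (PySem.List.pyGetD (bPref key ((PySem.List.pyRange 0 (M + 1)).map fun t => (1 <<< 33 : Int) ^ t.toNat) M) (i + r) [])
        j 0
    = PySem.List.pyGetD (bPat lock ((PySem.List.pyRange 0 (M + 1)).map fun t => (1 <<< 33 : Int) ^ t.toNat) ((PySem.List.pyGetD lock 0 []).length : Int)) r 0 *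
      PySem.List.pyGetD ((PySem.List.pyRange 0 (M + 1)).map fun t => (1 <<< 33 : Int) ^ t.toNat) j 0 := by
  set Bc : Int := (1 <<< 33 : Int) with hBc
  set pw : List Int := (PySem.List.pyRange 0 (M + 1)).map fun t => Bc ^ t.toNat with hpw
  set J : Nat := (PySem.List.pyGetD lock 0 []).length with hJ
  set row : List Int := PySem.List.pyGetD key (i + r) [] with hrow
  set lrow : List Int := PySem.List.pyGetD lock r [] with hlrow
  -- left side: prefix-sum difference
  rw [pv_pref_get key pw M (i + r) (by omega) (by omega),
      pv_rowPref_eq row pw M (by omega),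
      pv_pS_get row pw (M.toNat + 1) (j + (J : Int)) (by omega) (by omega),
      pv_pS_get row pw (M.toNat + 1) j hj (by omega)]
  -- right side: the pattern entry
  have hpat : PySem.List.pyGetD (bPat lock pw (J : Int)) r 0 = pS lrow pw J := by
    unfold bPat
    have hr : r = ((r.toNat : Nat) : Int) := by omega
    rw [hr, PySem.List.pyGetD_map_pyRange _ _ _ _ (by omega)]
    rw [PySem.List.foldl_add, PySem.List.pyRange_one]
    unfold pS
    simp only [sub_zero, Int.toNat_natCast, List.map_map, zero_add]
    congr 1
    apply List.map_congr_left
    intro t _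
    simp only [Function.comp_apply, ← hr, ← hlrow]
  rw [hpat, pv_pw_get Bc M j hj (by omega)]
  -- reduce to a sum identity
  have hsplit : (j + (J : Int)).toNat = j.toNat + J := by omega
  rw [hsplit]
  unfold pS
  rw [List.range_add, List.map_append, List.sum_append, add_sub_cancel_left]
  rw [← List.sum_map_mul_right, List.map_map]
  apply congrArg
  apply List.map_congr_left
  intro t ht
  have htJ : t < J := List.mem_range.mp ht
  simp only [Function.comp_apply]
  have e1 : ((j.toNat + t : Nat) : Int) = j + (t : Int) := by omega
  rw [e1]
  rw [← hv (t : Int) (by omega) (by omega)]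
  rw [hpw, pv_pw_get Bc M (j + (t : Int)) (by omega) (by omega),
      pv_pw_get Bc M (t : Int) (by omega) (by omega)]
  have e2 : (j + (t : Int)).toNat = t + j.toNat := by omega
  rw [e2, pow_add]
  have e3 : ((t : Int)).toNat = t := by omega
  rw [e3]
  ring

-- ===== VERDICT (by name: the statement is the Claim_ definition above) =====
theorem check_spec : Claim_equal_check := by
  intro lock key M _ hpre
  unfold Spec_check
  obtain ⟨hne, hrest⟩ := hpre
  have hhead : PySem.List.pyGetD lock 0 [] = lock.headD [] := by
    cases lock with
    | nil => simp at hne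
    | cons a l => rw [PySem.List.pyGetD_eq_getElem (a :: l) [] (by omega) (by simp)]; simp
  have hlen : 1 ≤ lock.length := List.length_pos_iff.mpr hne
  rw [Bool.eq_iff_iff]
  simp only [check, check_alt, List.any_eq_true, Bool.and_eq_true, List.all_eq_true,
    PySem.List.mem_pyRange_one, ite_eq_iff, Bool.or_eq_true, decide_eq_true_eq]
  constructor
  · rintro ⟨i, ⟨hi0, hiM⟩, ⟨-, hf⟩ | ⟨hiI, j, ⟨hj0, hjM⟩, ⟨-, hf⟩ | ⟨hjJ, hsame⟩⟩⟩
    · exact absurd hf (by simp)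
    · exact absurd hf (by simp)
    · push Not at hiI hjJ
      refine Or.inr ⟨by omega, i, ⟨hi0, by omega⟩, j, ⟨hj0, by omega⟩, ?_, ?_⟩
      · -- hash check: implied by the elementwise match
        intro r hr
        rw [beq_iff_eq]
        apply pv_verify_imp_hash lock key M i j r hi0 hiI hj0 hjJ hr.1 hr.2
        intro t ht0 ht1
        simp only [isSame, List.all_eq_true, PySem.List.mem_pyRange_one, beq_iff_eq] at hsame
        exact hsame r ⟨hr.1, hr.2⟩ t ⟨ht0, ht1⟩
      · -- verification = isSame
        intro r hr t ht
        simp only [isSame, List.all_eq_true, PySem.List.mem_pyRange_one, beq_iff_eq] at hsame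
        exact beq_iff_eq.mpr (hsame r hr t ht)
  · rintro (⟨-, hf⟩ | ⟨hng, i, ⟨hi0, hiM'⟩, j, ⟨hj0, hjM'⟩, -, hall⟩)
    · exact absurd hf (by simp)
    · push Not at hng
      obtain ⟨hI, hJ⟩ := hng
      by_cases hJ0 : (PySem.List.pyGetD lock 0 []).length = 0
      · refine ⟨i, ⟨hi0, by omega⟩, Or.inr ⟨by omega, 0, ⟨le_refl 0, by omega⟩, Or.inr ⟨by omega, ?_⟩⟩⟩
        simp only [isSame, List.all_eq_true, PySem.List.mem_pyRange_one]
        intro a ha b hb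
        exfalso; rw [hJ0] at hb; simp at hb; omega
      · refine ⟨i, ⟨hi0, by omega⟩, Or.inr ⟨by omega, j, ⟨hj0, by omega⟩, Or.inr ⟨by omega, ?_⟩⟩⟩
        simp only [isSame, List.all_eq_true, PySem.List.mem_pyRange_one]
        intro r hr t ht
        exact hall r hr t ht
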